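-- pv_equiv track=rewrite | github.com/DIG-Network/proof_research | sub-problems/verifier-oracle-model/experiments/adaptive-coordinate-or-rsparse-xor-tree-depth-wt-three-four-n7/script.py | build_r_xor_partition_masks
-- ===== SOURCE A (Python) =====
-- from itertools import combinations
--
-- N = 7
--
-- def build_r_xor_partition_masks(masks: list[int], r: int) -> list[tuple[int, int]]:
--     dom = len(masks)
--     full = (1 << dom) - 1
--     out: list[tuple[int, int]] = []
--     for idxs in combinations(range(N), r):
--         b0 = 0
--         for ki, mm in enumerate(masks):
--             p = 0
--             for i in idxs:
--                 p ^= (mm >> i) & 1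
--             if p == 0:
--                 b0 |= 1 << ki
--         b1 = full ^ b0
--         out.append((b0, b1))
--     return out
-- ===== SOURCE B (Python) =====
-- from itertools import combinations
--
-- N = 7
--
-- def build_r_xor_partition_masks(masks: list[int], r: int) -> list[tuple[int, int]]:
--     dom = len(masks)
--     full = (1 << dom) - 1
--     combos = list(combinations(range(N), r))
--     if not combos:
--         return []
--     # transpose once: cols[i] has bit ki set iff bit i of masks[ki] is set
--     cols = []
--     for i in range(N):
--         c = 0
--         for ki, mm in enumerate(masks):
--             if (mm >> i) & 1:
--                 c |= 1 << ki
--         cols.append(c)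
--     out: list[tuple[int, int]] = []
--     for idxs in combos:
--         b1 = 0
--         for i in idxs:
--             b1 ^= cols[i]
--         out.append((full ^ b1, b1))
--     return out
-- ===== Notes on version B (the rewrite author's own statement) =====
-- stated objective: alternative
-- what changed: B transposes the masks once into N per-index column bitmasks and computes each combination's parity-1 side as an XOR of precomputed columns (skipping the transposition when there are no combinations), instead of A's per-mask inner parity loop inside the combination loop.
import Mathlib
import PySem

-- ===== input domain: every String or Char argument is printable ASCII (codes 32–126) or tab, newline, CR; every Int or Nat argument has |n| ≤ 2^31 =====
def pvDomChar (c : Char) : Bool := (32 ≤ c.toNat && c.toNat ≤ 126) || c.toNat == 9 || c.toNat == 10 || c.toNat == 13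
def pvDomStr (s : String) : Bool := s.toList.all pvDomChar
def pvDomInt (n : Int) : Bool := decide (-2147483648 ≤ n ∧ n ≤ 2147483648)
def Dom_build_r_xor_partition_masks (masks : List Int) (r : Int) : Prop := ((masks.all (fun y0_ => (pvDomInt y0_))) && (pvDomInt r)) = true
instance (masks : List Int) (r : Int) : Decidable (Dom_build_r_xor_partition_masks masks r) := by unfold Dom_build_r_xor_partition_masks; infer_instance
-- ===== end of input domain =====

-- B transposes the masks once into N per-index column bitmasks and XORs precomputed columns
-- per combination, replacing A's per-mask inner parity loop (objective: alternative algorithm).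

-- ===== PORT A =====

-- itertools.combinations(xs, k): k-subsequences of xs in Python's (lexicographic) order
def pyCombinations : List Int → Nat → List (List Int)
  | _, 0 => [[]]
  | [], _ + 1 => []
  | x :: rest, k + 1 =>
      ((pyCombinations rest k).map (fun t => x :: t)) ++ pyCombinations rest (k + 1)

-- enumerate(ms) starting at k0
def pyEnum : Nat → List Int → List (Nat × Int)
  | _, [] => []
  | k, m :: ms => (k, m) :: pyEnum (k + 1) ms

-- inner loop: p ^= (mm >> i) & 1.  Int.shiftRight is Python's '>>' for a Nat shift amount;
-- i comes from range(7), so i ≥ 0 and i.toNat is exact.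
def pA_parity (mm : Int) (idxs : List Int) : Int :=
  idxs.foldl (fun p i => PySem.Int.bxor p (PySem.Int.band (Int.shiftRight mm i.toNat) 1)) 0

-- middle loop: b0 |= 1 << ki  whenever the parity is 0  (Int.shiftLeft is Python's '<<')
def pA_b0 (masks : List Int) (idxs : List Int) : Int :=
  (pyEnum 0 masks).foldl
    (fun b0 km => if pA_parity km.2 idxs = 0 then PySem.Int.bor b0 (Int.shiftLeft 1 km.1) else b0) 0

-- Python raises ValueError for r < 0 (combinations), hence Pre_ below; r.toNat is exact on Pre_.
def build_r_xor_partition_masks (masks : List Int) (r : Int) : List (Int × Int) :=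
  let full : Int := Int.shiftLeft 1 masks.length - 1
  (pyCombinations (PySem.List.pyRange 0 7 1) r.toNat).foldl
    (fun out idxs =>
      let b0 := pA_b0 masks idxs
      out ++ [(b0, PySem.Int.bxor full b0)]) []

-- ===== PORT B =====

-- inner transposition loop: c |= 1 << ki whenever bit i of masks[ki] is set
def colB (masks : List Int) (i : Int) : Int :=
  (pyEnum 0 masks).foldl
    (fun c km =>
      if PySem.Int.band (Int.shiftRight km.2 i.toNat) 1 ≠ 0 then PySem.Int.bor c (Int.shiftLeft 1 km.1) else c) 0

def build_r_xor_partition_masks_alt (masks : List Int) (r : Int) : List (Int × Int) :=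
  let full : Int := Int.shiftLeft 1 masks.length - 1
  let combos := pyCombinations (PySem.List.pyRange 0 7 1) r.toNat
  if combos = [] then []
  else
    let cols : List Int := (PySem.List.pyRange 0 7 1).foldl (fun cs i => cs ++ [colB masks i]) []
    combos.foldl
      (fun out idxs =>
        -- cols[i]: i ∈ range(7) is always in range, so pyGetD with default 0 is exact
        let b1 := idxs.foldl (fun b i => PySem.Int.bxor b (PySem.List.pyGetD cols i 0)) 0
        out ++ [(PySem.Int.bxor full b1, b1)]) []

-- ===== PRECONDITION & SPEC =====

-- Pre_ excludes exactly r < 0, on which Python's combinations raises ValueError.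
def Pre_build_r_xor_partition_masks (masks : List Int) (r : Int) : Prop := 0 ≤ r
instance (masks : List Int) (r : Int) : Decidable (Pre_build_r_xor_partition_masks masks r) := by
  unfold Pre_build_r_xor_partition_masks; infer_instance

def pvWitness_build_r_xor_partition_masks : List Int × Int := ([5, 3], 2)

def Spec_build_r_xor_partition_masks (masks : List Int) (r : Int) (out : List (Int × Int)) : Prop :=
  out = build_r_xor_partition_masks_alt masks r
instance (masks : List Int) (r : Int) (out : List (Int × Int)) :
    Decidable (Spec_build_r_xor_partition_masks masks r out) := by
  unfold Spec_build_r_xor_partition_masks; infer_instance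

-- ===== CLAIM (what is proved, stated in full; the proofs are below) =====
def Claim_equal_build_r_xor_partition_masks : Prop :=
  ∀ (masks : List Int) (r : Int), Dom_build_r_xor_partition_masks masks r →
    Pre_build_r_xor_partition_masks masks r →
    Spec_build_r_xor_partition_masks masks r (build_r_xor_partition_masks masks r)

-- ===== LEMMAS AND PROOFS =====

-- bit i of mm, as both ports test it
def bitB (mm : Int) (i : Nat) : Bool := PySem.Int.band (Int.shiftRight mm i) 1 == 1

-- Boolean parity of the bits of mm over idxs
def parB (mm : Int) (idxs : List Int) : Bool :=
  idxs.foldl (fun b i => Bool.xor b (bitB mm i.toNat)) false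

lemma band_one_cases (a : Int) : PySem.Int.band a 1 = 0 ∨ PySem.Int.band a 1 = 1 := by
  rw [PySem.Int.band_one]
  have h1 := PySem.Int.mod_nonneg a (b := 2) (by norm_num)
  have h2 := PySem.Int.mod_lt a (b := 2) (by norm_num)
  omega

lemma parity_fold (mm : Int) : ∀ (idxs : List Int) (b : Bool),
    idxs.foldl (fun p i => PySem.Int.bxor p (PySem.Int.band (Int.shiftRight mm i.toNat) 1)) (if b then 1 else 0)
    = if idxs.foldl (fun b i => Bool.xor b (bitB mm i.toNat)) b then 1 else 0 := by
  intro idxs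
  induction idxs with
  | nil => intro b; rfl
  | cons i rest ih =>
    intro b
    simp only [List.foldl_cons]
    have h : PySem.Int.bxor (if b = true then 1 else 0) (PySem.Int.band (Int.shiftRight mm i.toNat) 1)
        = if Bool.xor b (bitB mm i.toNat) then 1 else 0 := by
      rcases band_one_cases (Int.shiftRight mm i.toNat) with h | h <;> cases b <;>
        simp [bitB, h] <;> decide
    rw [h, ih]
    rfl

lemma parity_eq (mm : Int) (idxs : List Int) :
    pA_parity mm idxs = if parB mm idxs then 1 else 0 := by
  simpa [pA_parity, parB] using parity_fold mm idxs false

lemma orFold_cast (p : Int → Prop) [DecidablePred p] :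
    ∀ (ms : List Int) (k0 : Nat) (acc : Nat),
    (pyEnum k0 ms).foldl
      (fun b km => if p km.2 then PySem.Int.bor b (Int.shiftLeft 1 km.1) else b) (acc : Int)
    = ((pyEnum k0 ms).foldl
      (fun b km => if p km.2 then b ||| (1 <<< km.1) else b) acc : Nat) := by
  intro ms
  induction ms with
  | nil => intro k0 acc; rfl
  | cons m ms ih =>
    intro k0 acc
    simp only [pyEnum, List.foldl_cons]
    by_cases h : p m
    · rw [if_pos h, if_pos h, show (Int.shiftLeft 1 k0) = ((1 <<< k0 : Nat) : Int) from rfl,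
        PySem.Int.bor_natCast, ih]
    · rw [if_neg h, if_neg h, ih]

lemma testBit_or_pow (acc k0 k : Nat) :
    (acc ||| (1 <<< k0)).testBit k = (acc.testBit k || decide (k0 = k)) := by
  rw [Nat.testBit_or, Nat.one_shiftLeft, Nat.testBit_two_pow]

lemma testBit_one_succ (n : Nat) : Nat.testBit 1 (n + 1) = false := by
  simp [Nat.testBit_succ]

lemma testBit_orFold (p : Int → Prop) [DecidablePred p] :
    ∀ (ms : List Int) (k0 : Nat) (acc : Nat) (k : Nat),
    ((pyEnum k0 ms).foldl (fun b km => if p km.2 then b ||| (1 <<< km.1) else b) acc).testBit k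
    = (acc.testBit k ||
        (decide (k0 ≤ k) && (match ms[k - k0]? with | some mm => decide (p mm) | none => false))) := by
  intro ms
  induction ms with
  | nil => intro k0 acc k; simp [pyEnum]
  | cons m ms ih =>
    intro k0 acc k
    simp only [pyEnum, List.foldl_cons]
    rw [ih]
    rcases Nat.lt_trichotomy k k0 with h | h | h
    · have h2 : (¬ (k0 + 1 ≤ k)) ∧ ¬ (k0 ≤ k) ∧ ¬ (k0 = k) := by omega
      by_cases hp : p m <;>
        simp [hp, testBit_or_pow, h2.1, h2.2.1, h2.2.2]
    · subst h
      have hz : k - k = 0 := by omega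
      by_cases hp : p m <;>
        simp [hp, hz, testBit_or_pow, (by omega : ¬ (k + 1 ≤ k))]
    · have h2 : (k0 + 1 ≤ k) ∧ (k0 ≤ k) ∧ ¬ (k0 = k) ∧ k - k0 = (k - (k0 + 1)) + 1 := by omega
      by_cases hp : p m <;>
        simp [hp, testBit_or_pow, h2.1, h2.2.1, h2.2.2.1, h2.2.2.2, Bool.or_assoc, testBit_one_succ]

-- Nat-level shadows of the two OR-accumulating loops
def b0N (masks idxs : List Int) : Nat :=
  (pyEnum 0 masks).foldl (fun b km => if pA_parity km.2 idxs = 0 then b ||| (1 <<< km.1) else b) 0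

def colN (masks : List Int) (j : Nat) : Nat :=
  (pyEnum 0 masks).foldl
    (fun b km => if PySem.Int.band (Int.shiftRight km.2 j) 1 ≠ 0 then b ||| (1 <<< km.1) else b) 0

lemma pA_b0_cast (masks idxs : List Int) : pA_b0 masks idxs = (b0N masks idxs : Int) := by
  simpa [pA_b0, b0N] using orFold_cast (fun mm => pA_parity mm idxs = 0) masks 0 0

lemma colB_cast (masks : List Int) (i : Int) : colB masks i = (colN masks i.toNat : Int) := by
  simpa [colB, colN] using
    orFold_cast (fun mm => PySem.Int.band (Int.shiftRight mm i.toNat) 1 ≠ 0) masks 0 0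

lemma decide_parity (mm : Int) (idxs : List Int) :
    decide (pA_parity mm idxs = 0) = !parB mm idxs := by
  rw [parity_eq]; cases parB mm idxs <;> simp

lemma decide_bit' (mm : Int) (j : Nat) :
    decide (PySem.Int.band (Int.shiftRight mm j) 1 = 0) = !bitB mm j := by
  rcases band_one_cases (Int.shiftRight mm j) with h | h <;> simp [bitB, h]

lemma testBit_b0N (masks idxs : List Int) (k : Nat) :
    (b0N masks idxs).testBit k
    = (match masks[k]? with | some mm => !parB mm idxs | none => false) := by
  rw [b0N, testBit_orFold (fun mm => pA_parity mm idxs = 0) masks 0 0 k]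
  cases hmk : masks[k]? with
  | none => simp [hmk]
  | some mm => simp [decide_parity]

lemma testBit_colN (masks : List Int) (j k : Nat) :
    (colN masks j).testBit k
    = (match masks[k]? with | some mm => bitB mm j | none => false) := by
  rw [colN, testBit_orFold (fun mm => PySem.Int.band (Int.shiftRight mm j) 1 ≠ 0) masks 0 0 k]
  cases hmk : masks[k]? with
  | none => simp [hmk]
  | some mm => simp [decide_bit']

lemma xorFold_cast (g : Int → Nat) : ∀ (idxs : List Int) (acc : Nat),
    idxs.foldl (fun b i => PySem.Int.bxor b ((g i : Nat) : Int)) (acc : Int)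
    = ((idxs.foldl (fun b i => b ^^^ g i) acc : Nat) : Int) := by
  intro idxs
  induction idxs with
  | nil => intro acc; rfl
  | cons i rest ih =>
    intro acc
    simp only [List.foldl_cons, PySem.Int.bxor_natCast, ih]

lemma testBit_xorFold (g : Int → Nat) (k : Nat) : ∀ (idxs : List Int) (acc : Nat),
    (idxs.foldl (fun b i => b ^^^ g i) acc).testBit k
    = idxs.foldl (fun b i => Bool.xor b ((g i).testBit k)) (acc.testBit k) := by
  intro idxs
  induction idxs with
  | nil => intro acc; rfl
  | cons i rest ih =>
    intro acc
    simp only [List.foldl_cons, ih, Nat.testBit_xor]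

lemma foldl_xor_false (l : List Int) (b : Bool) :
    l.foldl (fun b (_ : Int) => Bool.xor b false) b = b := by
  induction l generalizing b with
  | nil => rfl
  | cons i rest ih => simpa using ih b

lemma testBit_b1N (masks idxs : List Int) (k : Nat) :
    (idxs.foldl (fun b i => b ^^^ colN masks i.toNat) 0).testBit k
    = (match masks[k]? with | some mm => parB mm idxs | none => false) := by
  rw [testBit_xorFold]
  cases hmk : masks[k]? with
  | none => simp only [testBit_colN, hmk, Nat.zero_testBit]; exact foldl_xor_false idxs false
  | some mm => simp only [testBit_colN, hmk, Nat.zero_testBit]; rfl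

lemma full_cast (n : Nat) : Int.shiftLeft 1 n - 1 = ((2 ^ n - 1 : Nat) : Int) := by
  rw [show Int.shiftLeft 1 n = ((1 <<< n : Nat) : Int) from rfl, Nat.one_shiftLeft,
    Nat.cast_sub Nat.one_le_two_pow, Nat.cast_one]

lemma nat_eq_b0 (masks idxs : List Int) :
    b0N masks idxs
    = (2 ^ masks.length - 1) ^^^ (idxs.foldl (fun b i => b ^^^ colN masks i.toNat) 0) := by
  apply Nat.eq_of_testBit_eq
  intro k
  rw [Nat.testBit_xor, Nat.testBit_two_pow_sub_one, testBit_b0N, testBit_b1N]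
  by_cases hk : k < masks.length
  · rw [List.getElem?_eq_getElem hk]
    cases parB masks[k] idxs <;> simp [hk]
  · rw [List.getElem?_eq_none (by omega)]
    simp [hk]

lemma nat_eq_b1 (masks idxs : List Int) :
    (2 ^ masks.length - 1) ^^^ b0N masks idxs
    = idxs.foldl (fun b i => b ^^^ colN masks i.toNat) 0 := by
  apply Nat.eq_of_testBit_eq
  intro k
  rw [Nat.testBit_xor, Nat.testBit_two_pow_sub_one, testBit_b0N, testBit_b1N]
  by_cases hk : k < masks.length
  · rw [List.getElem?_eq_getElem hk]
    cases parB masks[k] idxs <;> simp [hk]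
  · rw [List.getElem?_eq_none (by omega)]
    simp [hk]

lemma pair_core (masks idxs : List Int) (h7 : ∀ a ∈ idxs, (0 : Int) ≤ a ∧ a < 7) :
    (pA_b0 masks idxs,
      PySem.Int.bxor (Int.shiftLeft 1 masks.length - 1) (pA_b0 masks idxs))
    = (PySem.Int.bxor (Int.shiftLeft 1 masks.length - 1)
        (idxs.foldl (fun b i =>
          PySem.Int.bxor b (PySem.List.pyGetD ((PySem.List.pyRange 0 7 1).map (colB masks)) i 0)) 0),
       idxs.foldl (fun b i =>
          PySem.Int.bxor b (PySem.List.pyGetD ((PySem.List.pyRange 0 7 1).map (colB masks)) i 0)) 0) := by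
  have hb1 : (idxs.foldl (fun b i =>
        PySem.Int.bxor b (PySem.List.pyGetD ((PySem.List.pyRange 0 7 1).map (colB masks)) i 0)) 0)
      = ((idxs.foldl (fun b i => b ^^^ colN masks i.toNat) 0 : Nat) : Int) := by
    rw [PySem.List.foldl_congr_mem idxs _
      (fun b i => PySem.Int.bxor b ((colN masks i.toNat : Nat) : Int)) 0
      (fun acc i hi => by
        rw [PySem.List.pyGetD_map_pyRange_of_nonneg (colB masks) 7 i 0 (h7 i hi).1 (h7 i hi).2,
          colB_cast])]
    exact xorFold_cast (fun i => colN masks i.toNat) idxs 0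
  rw [hb1, pA_b0_cast, full_cast]
  rw [PySem.Int.bxor_natCast, PySem.Int.bxor_natCast]
  refine congrArg₂ Prod.mk ?_ ?_
  · exact congrArg _ (nat_eq_b0 masks idxs)
  · exact congrArg _ (nat_eq_b1 masks idxs)

lemma mem_pyCombinations : ∀ (xs : List Int) (k : Nat) (l : List Int),
    l ∈ pyCombinations xs k → ∀ a ∈ l, a ∈ xs := by
  intro xs
  induction xs with
  | nil =>
    intro k l hl a ha
    cases k <;> simp [pyCombinations] at hl
    subst hl; simp at ha
  | cons x rest ih =>
    intro k l hl a ha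
    cases k with
    | zero =>
      simp [pyCombinations] at hl
      subst hl; simp at ha
    | succ k =>
      simp only [pyCombinations, List.mem_append, List.mem_map] at hl
      rcases hl with ⟨t, ht, rfl⟩ | hl
      · rcases List.mem_cons.mp ha with rfl | ha
        · exact List.mem_cons_self ..
        · exact List.mem_cons_of_mem _ (ih k t ht a ha)
      · exact List.mem_cons_of_mem _ (ih (k + 1) l hl a ha)

lemma mem_pyRange07 (a : Int) (h : a ∈ PySem.List.pyRange 0 7 1) : 0 ≤ a ∧ a < 7 := by
  rw [show PySem.List.pyRange 0 7 1 = [0, 1, 2, 3, 4, 5, 6] from by decide] at h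
  simp only [List.mem_cons, List.not_mem_nil, or_false] at h
  rcases h with rfl | rfl | rfl | rfl | rfl | rfl | rfl <;> norm_num

-- ===== VERDICT (by name: the statement is the Claim_ definition above) =====
theorem build_r_xor_partition_masks_spec : Claim_equal_build_r_xor_partition_masks := by
  intro masks r _ _
  unfold Spec_build_r_xor_partition_masks
  unfold build_r_xor_partition_masks build_r_xor_partition_masks_alt
  by_cases hc : pyCombinations (PySem.List.pyRange 0 7 1) r.toNat = []
  · simp only [hc, if_pos, List.foldl_nil]
  · rw [if_neg hc]
    simp only [PySem.List.foldl_append_singleton_eq_map, List.nil_append]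
    apply List.map_congr_left
    intro idxs hidxs
    exact pair_core masks idxs
      (fun a ha => mem_pyRange07 a (mem_pyCombinations _ _ _ hidxs a ha))
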